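-- pv_equiv track=rewrite | github.com/shweta2812/Capstone-Insight-Seacrh-Engine | backend/main.py | _best_tier
-- ===== SOURCE A (Python) =====
-- def _best_tier(articles: list[dict]) -> str:
--     if not articles:
--         return "0B"
--     tiers = [str(a.get("credibility_tier", "0B")) for a in articles]
--     for t in ("1", "2", "3", "0B"):
--         if t in tiers:
--             return t
--     return "0B"
-- ===== SOURCE B (Python) =====
-- _RANK = {"1": 0, "2": 1, "3": 2, "0B": 3}
-- _TIER = ("1", "2", "3", "0B")
--
-- def _best_tier(articles: list[dict]) -> str:
--     # single pass: track the best (smallest) rank seen; 4 = nothing recognised yet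
--     best = 4
--     for a in articles:
--         r = _RANK.get(str(a.get("credibility_tier", "0B")), 4)
--         if r < best:
--             best = r
--     return _TIER[best] if best < 4 else "0B"
-- ===== Notes on version B (the rewrite author's own statement) =====
-- stated objective: simpler
-- what changed: Replaces the intermediate tier list plus four successive membership scans with a single pass that tracks the minimum priority rank via a rank table.
import Mathlib
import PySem

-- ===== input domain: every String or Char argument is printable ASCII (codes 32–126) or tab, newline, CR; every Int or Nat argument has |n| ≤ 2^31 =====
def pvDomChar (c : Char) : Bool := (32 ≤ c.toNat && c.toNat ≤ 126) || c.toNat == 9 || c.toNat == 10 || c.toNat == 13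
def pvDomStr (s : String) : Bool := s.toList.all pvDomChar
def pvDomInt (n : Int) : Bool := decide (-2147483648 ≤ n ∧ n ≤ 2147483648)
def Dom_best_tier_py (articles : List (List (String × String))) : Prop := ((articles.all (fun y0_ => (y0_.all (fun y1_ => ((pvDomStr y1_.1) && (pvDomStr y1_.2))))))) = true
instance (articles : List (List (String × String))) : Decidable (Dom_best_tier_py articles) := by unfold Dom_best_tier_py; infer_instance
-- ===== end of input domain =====

-- ===== PORT A =====
-- B replaces A's tier-list build plus four membership scans with one pass tracking the minimum priority rank (objective: simpler).
-- A: build the list of tiers, then scan it once per tier in priority order.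
-- Note: str(...) is the identity here since dict values are strings on this domain.
def best_tier_py (articles : List (List (String × String))) : String :=
  if articles = [] then "0B"
  else
    let tiers := articles.map (fun a => (PySem.Dict.mk a).getD "credibility_tier" "0B")
    if "1" ∈ tiers then "1"
    else if "2" ∈ tiers then "2"
    else if "3" ∈ tiers then "3"
    else if "0B" ∈ tiers then "0B"
    else "0B"

-- ===== PORT B =====
-- B: one pass tracking the minimum priority rank (4 = nothing recognised).
def bTierRank : PySem.Dict String Nat :=
  PySem.Dict.ofList [("1", 0), ("2", 1), ("3", 2), ("0B", 3)]

def best_tier_py_alt (articles : List (List (String × String))) : String :=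
  let best := articles.foldl
    (fun best a =>
      let r := bTierRank.getD ((PySem.Dict.mk a).getD "credibility_tier" "0B") 4
      if r < best then r else best) 4
  if best < 4 then (["1", "2", "3", "0B"].getD best "0B") else "0B"

-- ===== PRECONDITION & SPEC =====
def Spec_best_tier_py (articles : List (List (String × String))) (out : String) : Prop := out = best_tier_py_alt articles
instance (articles : List (List (String × String))) (out : String) : Decidable (Spec_best_tier_py articles out) := by unfold Spec_best_tier_py; infer_instance

-- ===== CLAIM (what is proved, stated in full; the proofs are below) =====
def Claim_equal_best_tier_py : Prop := ∀ (articles : List (List (String × String))), Dom_best_tier_py articles → Spec_best_tier_py articles (best_tier_py articles)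

-- ===== LEMMAS AND PROOFS =====

def pvRk (s : String) : Nat :=
  if s = "1" then 0 else if s = "2" then 1 else if s = "3" then 2 else if s = "0B" then 3 else 4

def pvTier (a : List (String × String)) : String :=
  (PySem.Dict.mk a).getD "credibility_tier" "0B"

def pvC (l : List String) : Nat :=
  if "1" ∈ l then 0 else if "2" ∈ l then 1 else if "3" ∈ l then 2 else if "0B" ∈ l then 3 else 4

theorem pvRank_eq (s : String) : bTierRank.getD s 4 = pvRk s := by
  by_cases h1 : s = "1"
  · subst h1; decide
  by_cases h2 : s = "2"
  · subst h2; decide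
  by_cases h3 : s = "3"
  · subst h3; decide
  by_cases h4 : s = "0B"
  · subst h4; decide
  have n1 : ¬(("1" : String) = s) := fun h => h1 h.symm
  have n2 : ¬(("2" : String) = s) := fun h => h2 h.symm
  have n3 : ¬(("3" : String) = s) := fun h => h3 h.symm
  have n4 : ¬(("0B" : String) = s) := fun h => h4 h.symm
  have h : bTierRank = PySem.Dict.mk [("1", 0), ("2", 1), ("3", 2), ("0B", 3)] := by decide
  rw [h]
  simp only [PySem.Dict.getD, PySem.Dict.get?_mk_cons, beq_iff_eq, pvRk,
    if_neg n1, if_neg n2, if_neg n3, if_neg n4,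
    if_neg h1, if_neg h2, if_neg h3, if_neg h4]
  rfl

theorem pvC_le (l : List String) : pvC l ≤ 4 := by
  unfold pvC; split_ifs <;> omega

theorem pvC_cons (s : String) (l : List String) :
    pvC (s :: l) = min (pvRk s) (pvC l) := by
  by_cases h1 : s = "1"
  · subst h1; unfold pvC pvRk; simp [List.mem_cons]
  by_cases h2 : s = "2"
  · subst h2; unfold pvC pvRk; simp only [List.mem_cons]; simp; split_ifs <;> omega
  by_cases h3 : s = "3"
  · subst h3; unfold pvC pvRk; simp only [List.mem_cons]; simp; split_ifs <;> omega
  by_cases h4 : s = "0B"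
  · subst h4; unfold pvC pvRk; simp only [List.mem_cons]; simp; split_ifs <;> omega
  · have n1 : ¬(("1" : String) = s) := fun h => h1 h.symm
    have n2 : ¬(("2" : String) = s) := fun h => h2 h.symm
    have n3 : ¬(("3" : String) = s) := fun h => h3 h.symm
    have n4 : ¬(("0B" : String) = s) := fun h => h4 h.symm
    unfold pvC pvRk
    simp only [List.mem_cons, n1, n2, n3, n4, false_or,
      if_neg h1, if_neg h2, if_neg h3, if_neg h4]
    split_ifs <;> omega

theorem pvFold (l : List (List (String × String))) :
    ∀ b : Nat, b ≤ 4 →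
      l.foldl (fun best a =>
        if pvRk (pvTier a) < best then pvRk (pvTier a) else best) b = min b (pvC (l.map pvTier)) := by
  induction l with
  | nil => intro b hb; simp [pvC]; omega
  | cons a t ih =>
      intro b hb
      simp only [List.foldl_cons, List.map_cons, pvC_cons]
      have hr : pvRk (pvTier a) ≤ 4 := by unfold pvRk; split_ifs <;> omega
      have hstep : (if pvRk (pvTier a) < b then pvRk (pvTier a) else b) = min b (pvRk (pvTier a)) := by
        split <;> omega
      rw [hstep, ih _ (by omega)]
      have := pvC_le (t.map pvTier)
      omega

-- ===== VERDICT (by name: the statement is the Claim_ definition above) =====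
theorem best_tier_py_spec : Claim_equal_best_tier_py := by
  intro articles _
  have hT : ∀ a : List (String × String),
      (PySem.Dict.mk a).getD "credibility_tier" "0B" = pvTier a := fun _ => rfl
  unfold Spec_best_tier_py
  simp only [best_tier_py, best_tier_py_alt, pvRank_eq, hT]
  have hfold := pvFold articles 4 (le_refl 4)
  rw [hfold]
  have hc := pvC_le (articles.map pvTier)
  rw [Nat.min_eq_right hc]
  cases articles with
  | nil => simp [pvC]
  | cons a t =>
      simp only [if_neg (List.cons_ne_nil a t)]
      unfold pvC
      split_ifs <;> first | rfl | omega
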